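-- pv_equiv track=rewrite | github.com/thehalleyyoung/deppy | src/deppy/equivalence/cohomological_engine.py | _gf2_kernel_basis
-- ===== SOURCE A (Python) =====
-- from typing import Any, Dict, FrozenSet, List, Optional, Set, Tuple
--
-- def _gf2_kernel_basis(matrix: List[List[int]]) -> List[List[int]]:
--     """Compute a basis for ker(M) over GF(2).
--
--     Returns vectors v such that M·v = 0 (mod 2).
--     These are the cocycles — elements of ker(δ^k).
--     """
--     if not matrix or not matrix[0]:
--         return []
--     m, n = len(matrix), len(matrix[0])
--     # Augment with identity of width n (tracking column operations)
--     aug = [row[:] + [1 if j == i else 0 for j in range(n)] for i, row in enumerate(matrix)]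
--     total_cols = n + n  # original columns + tracking columns
--
--     # Row reduce
--     rank = 0
--     pivot_cols: List[int] = []
--     for col in range(n):
--         pivot = None
--         for row in range(rank, m):
--             if aug[row][col] % 2 == 1:
--                 pivot = row
--                 break
--         if pivot is None:
--             continue
--         aug[rank], aug[pivot] = aug[pivot], aug[rank]
--         for row in range(m):
--             if row != rank and aug[row][col] % 2 == 1:
--                 for c in range(total_cols):
--                     aug[row][c] = (aug[row][c] + aug[rank][c]) % 2
--         pivot_cols.append(col)
--         rank += 1
--
--     # Free variables → kernel basis vectors
--     free_cols = [c for c in range(n) if c not in pivot_cols]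
--     basis: List[List[int]] = []
--     for fc in free_cols:
--         vec = [0] * n
--         vec[fc] = 1
--         for i, pc in enumerate(pivot_cols):
--             if i < m:
--                 vec[pc] = aug[i][fc] % 2
--         basis.append(vec)
--     return basis
-- ===== SOURCE B (Python) =====
-- from typing import List
--
-- def _gf2_kernel_basis(matrix: List[List[int]]) -> List[List[int]]:
--     """Kernel basis over GF(2) via two-stage elimination.
--
--     Stage 1 reduces a 0/1 copy of the matrix to row ECHELON form,
--     eliminating only BELOW each pivot (no identity augmentation, rows
--     half as wide as A's augmented rows).  Stage 2 back-substitutes once,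
--     bottom-up, to obtain the fully reduced pivot rows, from which the
--     kernel vectors are read off column by column.
--     """
--     if not matrix or not matrix[0]:
--         return []
--     m, n = len(matrix), len(matrix[0])
--     rows = [[x % 2 for x in row[:n]] for row in matrix]
--
--     # Stage 1: forward elimination to row echelon form
--     rank = 0
--     pivot_cols: List[int] = []
--     for col in range(n):
--         p = next((r for r in range(rank, m) if rows[r][col]), None)
--         if p is None:
--             continue
--         rows[rank], rows[p] = rows[p], rows[rank]
--         for r in range(rank + 1, m):
--             if rows[r][col]:
--                 rows[r] = [(a + b) % 2 for a, b in zip(rows[r], rows[rank])]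
--         pivot_cols.append(col)
--         rank += 1
--
--     # Stage 2: back-substitution, bottom pivot row up
--     red: List[List[int]] = []
--     for i in reversed(range(rank)):
--         v = rows[i]
--         for pc, w in zip(pivot_cols[i + 1:], red):
--             if v[pc]:
--                 v = [(a + b) % 2 for a, b in zip(v, w)]
--         red = [v] + red
--
--     # Read the kernel vectors off the reduced rows
--     basis: List[List[int]] = []
--     for fc in [c for c in range(n) if c not in pivot_cols]:
--         vec = [0] * n
--         vec[fc] = 1
--         for i, pc in enumerate(pivot_cols):
--             vec[pc] = red[i][fc]
--         basis.append(vec)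
--     return basis
-- ===== Notes on version B (the rewrite author's own statement) =====
-- stated objective: faster
-- what changed: A's single-pass Gauss-Jordan on identity-augmented 2n-wide rows (eliminating above and below every pivot) is replaced by a two-stage scheme: forward elimination to row echelon form on n-wide 0/1 rows (eliminating below only), then one bottom-up back-substitution pass over the at-most-rank pivot rows, from which the kernel vectors are read off.
-- outside the precondition, e.g. on _gf2_kernel_basis([[0, 0], [1]]): A returns [[0, 1]], B raises IndexError
import Mathlib
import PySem

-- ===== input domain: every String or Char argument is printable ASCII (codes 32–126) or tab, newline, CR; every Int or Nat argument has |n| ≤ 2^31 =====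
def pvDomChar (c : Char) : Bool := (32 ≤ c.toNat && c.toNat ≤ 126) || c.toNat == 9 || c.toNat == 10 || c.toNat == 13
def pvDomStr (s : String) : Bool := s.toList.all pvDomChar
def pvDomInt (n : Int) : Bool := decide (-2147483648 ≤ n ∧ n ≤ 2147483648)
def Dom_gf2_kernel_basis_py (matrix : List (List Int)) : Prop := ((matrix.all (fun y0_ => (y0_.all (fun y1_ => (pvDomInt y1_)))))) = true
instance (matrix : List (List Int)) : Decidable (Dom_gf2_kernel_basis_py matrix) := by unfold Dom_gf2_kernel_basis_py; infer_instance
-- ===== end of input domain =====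

-- B replaces A's one-pass Gauss-Jordan on identity-augmented 2n-wide rows by forward elimination
-- to row echelon form (eliminating below pivots only, on n-wide 0/1 rows) followed by one bottom-up
-- back-substitution pass; equal return values proved on rectangular matrices.

-- ===== PORT A =====
-- aug[i] (list indexing; in range on every index the algorithm uses under Pre_)
def pvRowA (aug : List (List Int)) (i : Nat) : List Int := aug.getD i []

-- 'for row in range(rank, m): if aug[row][col] % 2 == 1: pivot = row; break'
def pvFindPivotA (aug : List (List Int)) (col rank m : Nat) : Option Nat :=
  (List.range' rank (m - rank)).find? (fun r => (pvRowA aug r).getD col 0 % 2 == 1)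

-- one iteration of A's 'for col in range(n)' loop over the state (aug, rank, pivot_cols)
def pvElimStepA (m n col : Nat) (st : List (List Int) × Nat × List Nat) :
    List (List Int) × Nat × List Nat :=
  match st with
  | (aug, rank, pcs) =>
    match pvFindPivotA aug col rank m with
    | none => (aug, rank, pcs)
    | some p =>
      let rowR := pvRowA aug rank
      let rowP := pvRowA aug p
      let aug1 := (aug.set rank rowP).set p rowR
      -- 'for row in range(m): if row != rank and aug[row][col] % 2 == 1:' add pivot row mod 2
      let aug2 := aug1.mapIdx (fun r rowv =>
        if r ≠ rank ∧ rowv.getD col 0 % 2 == 1 then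
          (List.range (n + n)).map (fun c => (rowv.getD c 0 + rowP.getD c 0) % 2)
        else rowv)
      (aug2, rank + 1, pcs ++ [col])

def pvElimA (m n : Nat) (aug0 : List (List Int)) : List (List Int) × Nat × List Nat :=
  (List.range n).foldl (fun st col => pvElimStepA m n col st) (aug0, 0, ([] : List Nat))

-- free columns → basis vectors ('vec = [0]*n; vec[fc] = 1; vec[pc] = aug[i][fc] % 2 if i < m')
def pvExtractA (m n : Nat) (st : List (List Int) × Nat × List Nat) : List (List Int) :=
  match st with
  | (aug, _, pcs) =>
    ((List.range n).filter (fun c => !(pcs.contains c))).map (fun fc =>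
      pcs.zipIdx.foldl (fun vec pci =>
        if pci.2 < m then vec.set pci.1 ((pvRowA aug pci.2).getD fc 0 % 2) else vec)
        ((List.replicate n (0 : Int)).set fc 1))

def gf2_kernel_basis_py (matrix : List (List Int)) : List (List Int) :=
  match matrix with
  | [] => []
  | r0 :: _ =>
    if r0.isEmpty then []
    else
      let m := matrix.length
      let n := r0.length
      -- aug = [row + identity row i]
      let aug0 := matrix.mapIdx (fun i row =>
        row ++ (List.range n).map (fun j => if j = i then (1 : Int) else 0))
      pvExtractA m n (pvElimA m n aug0)

-- ===== PORT B =====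
-- '[(a + b) % 2 for a, b in zip(v, w)]' (zip truncates to the shorter list, like Python)
def pvXorRow (v w : List Int) : List Int := List.zipWith (fun a b => (a + b) % 2) v w

-- 'next((r for r in range(rank, m) if rows[r][col]), None)'
def pvFindPivotB (rows : List (List Int)) (col rank m : Nat) : Option Nat :=
  (List.range' rank (m - rank)).find? (fun r => (rows.getD r []).getD col 0 != 0)

-- one iteration of B's forward-elimination 'for col in range(n)' loop
def pvElimStepB (m col : Nat) (st : List (List Int) × Nat × List Nat) :
    List (List Int) × Nat × List Nat :=
  match st with
  | (rows, rank, pcs) =>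
    match pvFindPivotB rows col rank m with
    | none => (rows, rank, pcs)
    | some p =>
      let rowR := rows.getD rank []
      let rowP := rows.getD p []
      let rows1 := (rows.set rank rowP).set p rowR
      -- 'for r in range(rank + 1, m): if rows[r][col]: rows[r] = xor with rows[rank]'
      let rows2 := rows1.mapIdx (fun r x =>
        if rank + 1 ≤ r ∧ x.getD col 0 ≠ 0 then pvXorRow x rowP else x)
      (rows2, rank + 1, pcs ++ [col])

def pvElimB (m n : Nat) (rows0 : List (List Int)) : List (List Int) × Nat × List Nat :=
  (List.range n).foldl (fun st col => pvElimStepB m col st) (rows0, 0, ([] : List Nat))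

-- inner loop of stage 2: 'for pc, w in zip(pivot_cols[i+1:], red): if v[pc]: v = xor(v, w)'
def pvBackRow (v : List Int) (pairs : List (Nat × List Int)) : List Int :=
  pairs.foldl (fun v pw => if v.getD pw.1 0 ≠ 0 then pvXorRow v pw.2 else v) v

-- 'red = []; for i in reversed(range(rank)): ...; red = [v] + red'
def pvBackSub (rows : List (List Int)) (pcs : List Nat) (rank : Nat) : List (List Int) :=
  (List.range rank).reverse.foldl
    (fun red i => pvBackRow (rows.getD i []) ((pcs.drop (i + 1)).zip red) :: red) []

-- 'vec = [0]*n; vec[fc] = 1; vec[pc] = red[i][fc]'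
def pvExtractB (n : Nat) (pcs : List Nat) (red : List (List Int)) : List (List Int) :=
  ((List.range n).filter (fun c => !(pcs.contains c))).map (fun fc =>
    pcs.zipIdx.foldl (fun vec pci => vec.set pci.1 ((red.getD pci.2 []).getD fc 0))
      ((List.replicate n (0 : Int)).set fc 1))

def gf2_kernel_basis_py_alt (matrix : List (List Int)) : List (List Int) :=
  match matrix with
  | [] => []
  | r0 :: _ =>
    if r0.isEmpty then []
    else
      let m := matrix.length
      let n := r0.length
      -- rows = [[x % 2 for x in row[:n]] for row in matrix]
      let rows0 := matrix.map (fun row => (row.take n).map (fun x => x % 2))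
      match pvElimB m n rows0 with
      | (rows, rank, pcs) => pvExtractB n pcs (pvBackSub rows pcs rank)

-- ===== PRECONDITION & SPEC =====
-- Pre_ excludes matrices in which some row is SHORTER than the (nonempty) first row: there A's
-- misaligned identity augmentation raises IndexError on some inputs and on others returns an
-- accidental value read from the identity block, and B itself raises IndexError slicing/indexing
-- the short row.
def Pre_gf2_kernel_basis_py (matrix : List (List Int)) : Prop :=
  ∀ row ∈ matrix, (matrix.headD []).length ≤ row.length
instance (matrix : List (List Int)) : Decidable (Pre_gf2_kernel_basis_py matrix) := by
  unfold Pre_gf2_kernel_basis_py; infer_instance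

def pvWitness_gf2_kernel_basis_py : List (List Int) := [[1, 1, 0], [0, 1, 1]]

def Spec_gf2_kernel_basis_py (matrix : List (List Int)) (out : List (List Int)) : Prop :=
  out = gf2_kernel_basis_py_alt matrix
instance (matrix : List (List Int)) (out : List (List Int)) :
    Decidable (Spec_gf2_kernel_basis_py matrix out) := by
  unfold Spec_gf2_kernel_basis_py; infer_instance

-- ===== CLAIM (what is proved, stated in full; the proofs are below) =====
def Claim_equal_gf2_kernel_basis_py : Prop :=
  ∀ (matrix : List (List Int)), Dom_gf2_kernel_basis_py matrix →
    Pre_gf2_kernel_basis_py matrix →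
    Spec_gf2_kernel_basis_py matrix (gf2_kernel_basis_py matrix)

-- ===== LEMMAS AND PROOFS =====

-- sequential elimination of v by the (frozen) echelon rows with indices idxs, in order
def pvElimSeq (rows : List (List Int)) (pcs : List Nat) (idxs : List Nat) (v : List Int) :
    List Int :=
  idxs.foldl (fun v i =>
    if v.getD (pcs.getD i 0) 0 ≠ 0 then pvXorRow v (rows.getD i []) else v) v

-- the lockstep invariant between A's state (aug, rank, pcs) and B's state (rows, rank, pcs)
def pvInv (m n : Nat) (sa sb : List (List Int) × Nat × List Nat) : Prop :=
  sa.1.length = m ∧ sb.1.length = m ∧ sa.2.1 = sb.2.1 ∧ sa.2.2 = sb.2.2 ∧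
  sb.2.2.length = sb.2.1 ∧ sb.2.1 ≤ m ∧
  (∀ i, i < sb.2.1 → sb.2.2.getD i 0 < n) ∧
  (∀ r, r < m → n ≤ (sa.1.getD r []).length) ∧
  (∀ r, r < m → (sb.1.getD r []).length = n) ∧
  (∀ r, r < m → ∀ j, j < n →
    (sb.1.getD r []).getD j 0 = 0 ∨ (sb.1.getD r []).getD j 0 = 1) ∧
  (∀ i, i < sb.2.1 → (sb.1.getD i []).getD (sb.2.2.getD i 0) 0 = 1) ∧
  (∀ i, i < sb.2.1 → ∀ r, i < r → r < m →
    (sb.1.getD r []).getD (sb.2.2.getD i 0) 0 = 0) ∧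
  (∀ r, sb.2.1 ≤ r → r < m → ∀ j, j < n →
    (sa.1.getD r []).getD j 0 % 2 = (sb.1.getD r []).getD j 0) ∧
  (∀ i, i < sb.2.1 → ∀ j, j < n →
    (sa.1.getD i []).getD j 0 % 2 =
      (pvElimSeq sb.1 sb.2.2 (List.range' (i + 1) (sb.2.1 - i - 1)) (sb.1.getD i [])).getD j 0)

-- generic list-access helpers
theorem pv_getD_set {α : Type} (l : List α) (i : Nat) (v : α) (j : Nat) (d : α) :
    (l.set i v).getD j d = if i = j ∧ i < l.length then v else l.getD j d := by
  simp only [List.getD, List.getElem?_set]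
  split <;> split <;> simp_all

theorem pv_getD_mapIdx {α : Type} (l : List α) (f : Nat → α → α) (r : Nat) (d : α)
    (h : r < l.length) : (l.mapIdx f).getD r d = f r (l.getD r d) := by
  simp [List.getD, h]

theorem pv_getD_map_range {α : Type} (n : Nat) (f : Nat → α) (j : Nat) (d : α) (h : j < n) :
    ((List.range n).map f).getD j d = f j := by
  simp [List.getD, h]

theorem pv_getD_map {α β : Type} (l : List α) (f : α → β) (r : Nat) (d : α) (e : β)
    (h : r < l.length) : (l.map f).getD r e = f (l.getD r d) := by
  simp [List.getD, h]

theorem pv_getD_append_left {α : Type} (a b : List α) (j : Nat) (d : α) (h : j < a.length) :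
    (a ++ b).getD j d = a.getD j d := by
  simp [List.getD, List.getElem?_append_left h]

theorem pv_getD_swap {α : Type} (l : List α) (d : α) (rank p r : Nat)
    (hr : rank < l.length) (hp : p < l.length) :
    ((l.set rank (l.getD p d)).set p (l.getD rank d)).getD r d =
      if r = p then l.getD rank d else if r = rank then l.getD p d else l.getD r d := by
  rw [pv_getD_set, pv_getD_set]
  simp only [List.length_set]
  split_ifs <;> first | rfl | simp_all

theorem pv_find_congr {α : Type} (p q : α → Bool) :
    ∀ (l : List α), (∀ x ∈ l, p x = q x) → l.find? p = l.find? q := by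
  intro l
  induction l with
  | nil => simp
  | cons a t ih =>
    intro h
    simp only [List.find?_cons]
    rw [h a (by simp)]
    cases q a
    · exact ih (fun x hx => h x (by simp [hx]))
    · simp

theorem pv_foldl_congr {α β : Type} (f g : β → α → β) :
    ∀ (l : List α) (b : β), (∀ x ∈ l, ∀ y, f y x = g y x) →
      l.foldl f b = l.foldl g b := by
  intro l
  induction l with
  | nil => simp
  | cons a t ih =>
    intro b h
    simp only [List.foldl_cons]
    rw [h a (by simp)]
    exact ih _ (fun x hx y => h x (by simp [hx]) y)

-- pvXorRow access
theorem pv_xor_length (v w : List Int) : (pvXorRow v w).length = min v.length w.length := by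
  simp [pvXorRow]

theorem pv_getD_xor (v w : List Int) (j : Nat) (hv : j < v.length) (hw : j < w.length) :
    (pvXorRow v w).getD j 0 = (v.getD j 0 + w.getD j 0) % 2 := by
  simp [pvXorRow, List.getD, hv, hw]

theorem pv_mod2_01 (a : Int) : a % 2 = 0 ∨ a % 2 = 1 := Int.emod_two_eq a

-- lists of equal length n with equal entries are equal
theorem pv_list_ext (v w : List Int) (n : Nat) (hv : v.length = n) (hw : w.length = n)
    (h : ∀ j, j < n → v.getD j 0 = w.getD j 0) : v = w := by
  apply List.ext_getElem (by omega)
  intro j hj _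
  have := h j (by omega)
  simpa [List.getD, List.getElem?_eq_getElem, hj, show j < w.length by omega] using this

-- pvElimSeq basics
theorem pv_elimSeq_nil (rows : List (List Int)) (pcs : List Nat) (v : List Int) :
    pvElimSeq rows pcs [] v = v := rfl

theorem pv_elimSeq_cons (rows : List (List Int)) (pcs : List Nat) (i : Nat) (t : List Nat)
    (v : List Int) :
    pvElimSeq rows pcs (i :: t) v =
      pvElimSeq rows pcs t
        (if v.getD (pcs.getD i 0) 0 ≠ 0 then pvXorRow v (rows.getD i []) else v) := rfl

theorem pv_elimSeq_append (rows : List (List Int)) (pcs : List Nat) (s t : List Nat)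
    (v : List Int) :
    pvElimSeq rows pcs (s ++ t) v = pvElimSeq rows pcs t (pvElimSeq rows pcs s v) := by
  simp [pvElimSeq, List.foldl_append]

-- good rows: every indexed row is a 0/1 vector of length n
def pvGoodRows (rows : List (List Int)) (n : Nat) (idxs : List Nat) : Prop :=
  ∀ i ∈ idxs, (rows.getD i []).length = n ∧
    (∀ j, j < n → (rows.getD i []).getD j 0 = 0 ∨ (rows.getD i []).getD j 0 = 1)

theorem pv_xor_good (v w : List Int) (n : Nat)
    (hv : v.length = n ∧ ∀ j, j < n → v.getD j 0 = 0 ∨ v.getD j 0 = 1)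
    (hw : w.length = n ∧ ∀ j, j < n → w.getD j 0 = 0 ∨ w.getD j 0 = 1) :
    (pvXorRow v w).length = n ∧
      (∀ j, j < n → (pvXorRow v w).getD j 0 = 0 ∨ (pvXorRow v w).getD j 0 = 1) := by
  refine ⟨by simp [pv_xor_length, hv.1, hw.1], ?_⟩
  intro j hj
  rw [pv_getD_xor v w j (by omega) (by omega)]
  exact pv_mod2_01 _

theorem pv_elimSeq_good (rows : List (List Int)) (pcs : List Nat) (n : Nat) :
    ∀ (idxs : List Nat) (v : List Int), pvGoodRows rows n idxs →
      (v.length = n ∧ ∀ j, j < n → v.getD j 0 = 0 ∨ v.getD j 0 = 1) →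
      ((pvElimSeq rows pcs idxs v).length = n ∧
        ∀ j, j < n → (pvElimSeq rows pcs idxs v).getD j 0 = 0 ∨
          (pvElimSeq rows pcs idxs v).getD j 0 = 1) := by
  intro idxs
  induction idxs with
  | nil => intro v _ hv; exact hv
  | cons i t ih =>
    intro v hg hv
    rw [pv_elimSeq_cons]
    have hgt : pvGoodRows rows n t := fun x hx => hg x (by simp [hx])
    by_cases hc : v.getD (pcs.getD i 0) 0 ≠ 0
    · rw [if_pos hc]
      exact ih _ hgt (pv_xor_good v _ n hv (hg i (by simp)))
    · rw [if_neg hc]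
      exact ih _ hgt hv

-- if every used row is 0 at position p, elimination does not change position p
theorem pv_elimSeq_untouched (rows : List (List Int)) (pcs : List Nat) (n p : Nat) (hp : p < n) :
    ∀ (idxs : List Nat) (v : List Int), pvGoodRows rows n idxs →
      (v.length = n ∧ ∀ j, j < n → v.getD j 0 = 0 ∨ v.getD j 0 = 1) →
      (∀ i ∈ idxs, (rows.getD i []).getD p 0 = 0) →
      (pvElimSeq rows pcs idxs v).getD p 0 = v.getD p 0 := by
  intro idxs
  induction idxs with
  | nil => intro v _ _ _; rfl
  | cons i t ih =>
    intro v hg hv hz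
    rw [pv_elimSeq_cons]
    have hgt : pvGoodRows rows n t := fun x hx => hg x (by simp [hx])
    have hzt : ∀ x ∈ t, (rows.getD x []).getD p 0 = 0 := fun x hx => hz x (by simp [hx])
    by_cases hc : v.getD (pcs.getD i 0) 0 ≠ 0
    · rw [if_pos hc, ih _ hgt (pv_xor_good v _ n hv (hg i (by simp))) hzt]
      rw [pv_getD_xor v _ p (by omega) (by rw [(hg i (by simp)).1]; omega)]
      rw [hz i (by simp), Int.add_zero]
      rcases hv.2 p hp with h | h <;> rw [h] <;> rfl
    · rw [if_neg hc]
      exact ih _ hgt hv hzt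

theorem pv_xor_len_n (v w : List Int) (n : Nat) (hv : v.length = n) (hw : w.length = n) :
    (pvXorRow v w).length = n := by
  rw [pv_xor_length, hv, hw, Nat.min_self]

theorem pv_xor_rot (v w r : List Int) (n : Nat) (hv : v.length = n) (hw : w.length = n)
    (hr : r.length = n) : pvXorRow (pvXorRow v w) r = pvXorRow (pvXorRow v r) w := by
  apply pv_list_ext _ _ n
    (pv_xor_len_n _ _ n (pv_xor_len_n v w n hv hw) hr)
    (pv_xor_len_n _ _ n (pv_xor_len_n v r n hv hr) hw)
  intro j hj
  rw [pv_getD_xor (pvXorRow v w) r j (by rw [pv_xor_len_n v w n hv hw]; omega) (by omega),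
    pv_getD_xor (pvXorRow v r) w j (by rw [pv_xor_len_n v r n hv hr]; omega) (by omega),
    pv_getD_xor v w j (by omega) (by omega), pv_getD_xor v r j (by omega) (by omega)]
  omega

theorem pv_xor_assoc' (v w r : List Int) (n : Nat) (hv : v.length = n) (hw : w.length = n)
    (hr : r.length = n) : pvXorRow (pvXorRow v w) r = pvXorRow v (pvXorRow w r) := by
  apply pv_list_ext _ _ n
    (pv_xor_len_n _ _ n (pv_xor_len_n v w n hv hw) hr)
    (pv_xor_len_n _ _ n hv (pv_xor_len_n w r n hw hr))
  intro j hj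
  rw [pv_getD_xor (pvXorRow v w) r j (by rw [pv_xor_len_n v w n hv hw]; omega) (by omega),
    pv_getD_xor v w j (by omega) (by omega),
    pv_getD_xor v (pvXorRow w r) j (by omega) (by rw [pv_xor_len_n w r n hw hr]; omega),
    pv_getD_xor w r j (by omega) (by omega)]
  omega

theorem pv_xor_cancel (v w r : List Int) (n : Nat) (hv : v.length = n) (hw : w.length = n)
    (hr : r.length = n) : pvXorRow (pvXorRow v r) (pvXorRow w r) = pvXorRow v w := by
  apply pv_list_ext _ _ n
    (pv_xor_len_n _ _ n (pv_xor_len_n v r n hv hr) (pv_xor_len_n w r n hw hr))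
    (pv_xor_len_n v w n hv hw)
  intro j hj
  rw [pv_getD_xor (pvXorRow v r) (pvXorRow w r) j (by rw [pv_xor_len_n v r n hv hr]; omega)
      (by rw [pv_xor_len_n w r n hw hr]; omega),
    pv_getD_xor v r j (by omega) (by omega), pv_getD_xor w r j (by omega) (by omega),
    pv_getD_xor v w j (by omega) (by omega)]
  omega

-- linearity of sequential elimination over GF(2)
theorem pv_elimSeq_linear (rows : List (List Int)) (pcs : List Nat) (n : Nat) :
    ∀ (idxs : List Nat) (v w : List Int), pvGoodRows rows n idxs →
      (∀ i ∈ idxs, pcs.getD i 0 < n) →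
      (v.length = n ∧ ∀ j, j < n → v.getD j 0 = 0 ∨ v.getD j 0 = 1) →
      (w.length = n ∧ ∀ j, j < n → w.getD j 0 = 0 ∨ w.getD j 0 = 1) →
      pvElimSeq rows pcs idxs (pvXorRow v w) =
        pvXorRow (pvElimSeq rows pcs idxs v) (pvElimSeq rows pcs idxs w) := by
  intro idxs
  induction idxs with
  | nil => intro v w _ _ _ _; rfl
  | cons i t ih =>
    intro v w hg hpc hv hw
    have hgi := hg i (by simp)
    have hpci := hpc i (by simp)
    have hgt : pvGoodRows rows n t := fun x hx => hg x (by simp [hx])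
    have hpct : ∀ x ∈ t, pcs.getD x 0 < n := fun x hx => hpc x (by simp [hx])
    have hxget : (pvXorRow v w).getD (pcs.getD i 0) 0 =
        (v.getD (pcs.getD i 0) 0 + w.getD (pcs.getD i 0) 0) % 2 :=
      pv_getD_xor v w _ (by omega) (by omega)
    rw [pv_elimSeq_cons, pv_elimSeq_cons, pv_elimSeq_cons]
    rcases hv.2 _ hpci with hv0 | hv1 <;> rcases hw.2 _ hpci with hw0 | hw1
    · rw [if_neg (by rw [hxget, hv0, hw0]; simp), if_neg (by rw [hv0]; simp),
        if_neg (by rw [hw0]; simp)]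
      exact ih v w hgt hpct hv hw
    · rw [if_pos (by rw [hxget, hv0, hw1]; norm_num), if_neg (by rw [hv0]; simp),
        if_pos (by rw [hw1]; norm_num)]
      rw [pv_xor_assoc' v w _ n hv.1 hw.1 hgi.1]
      exact ih v (pvXorRow w _) hgt hpct hv (pv_xor_good w _ n hw hgi)
    · rw [if_pos (by rw [hxget, hv1, hw0]; norm_num), if_pos (by rw [hv1]; norm_num),
        if_neg (by rw [hw0]; simp)]
      rw [pv_xor_rot v w _ n hv.1 hw.1 hgi.1]
      exact ih (pvXorRow v _) w hgt hpct (pv_xor_good v _ n hv hgi) hw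
    · rw [if_neg (by rw [hxget, hv1, hw1]; norm_num), if_pos (by rw [hv1]; norm_num),
        if_pos (by rw [hw1]; norm_num)]
      rw [← pv_xor_cancel v w _ n hv.1 hw.1 hgi.1]
      exact ih (pvXorRow v _) (pvXorRow w _) hgt hpct
        (pv_xor_good v _ n hv hgi) (pv_xor_good w _ n hw hgi)

-- after eliminating indices [a, a+b) the entries at their pivot columns are all 0
theorem pv_elimSeq_clears (rows : List (List Int)) (pcs : List Nat) (n : Nat)
    (a b : Nat) (v : List Int)
    (hg : pvGoodRows rows n (List.range' a b))
    (hpc : ∀ i ∈ List.range' a b, pcs.getD i 0 < n)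
    (hpiv : ∀ i ∈ List.range' a b, (rows.getD i []).getD (pcs.getD i 0) 0 = 1)
    (hzero : ∀ i ∈ List.range' a b, ∀ l ∈ List.range' a b, i < l →
      (rows.getD l []).getD (pcs.getD i 0) 0 = 0)
    (hv : v.length = n ∧ ∀ j, j < n → v.getD j 0 = 0 ∨ v.getD j 0 = 1) :
    ∀ i ∈ List.range' a b,
      (pvElimSeq rows pcs (List.range' a b) v).getD (pcs.getD i 0) 0 = 0 := by
  intro i hi
  obtain ⟨hai, hib⟩ := List.mem_range'_1.mp hi
  have hsplit : List.range' a (i - a) ++ List.range' i (b - (i - a)) = List.range' a b := by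
    calc List.range' a (i - a) ++ List.range' i (b - (i - a))
        = List.range' a (i - a) ++ List.range' (a + 1 * (i - a)) (b - (i - a)) := by
          rw [show a + 1 * (i - a) = i by omega]
      _ = List.range' a ((i - a) + (b - (i - a))) := List.range'_append
      _ = List.range' a b := by rw [show (i - a) + (b - (i - a)) = b by omega]
  have hmem1 : ∀ x ∈ List.range' a (i - a), x ∈ List.range' a b := by
    intro x hx
    have := List.mem_range'_1.mp hx
    exact List.mem_range'_1.mpr (by omega)
  have hmem2 : ∀ x ∈ List.range' (i + 1) (b - (i - a) - 1), x ∈ List.range' a b := by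
    intro x hx
    have := List.mem_range'_1.mp hx
    exact List.mem_range'_1.mpr (by omega)
  rw [← hsplit, pv_elimSeq_append]
  have hv1 := pv_elimSeq_good rows pcs n (List.range' a (i - a)) v
    (fun x hx => hg x (hmem1 x hx)) hv
  set v1 := pvElimSeq rows pcs (List.range' a (i - a)) v with hv1d
  have hstep : List.range' i (b - (i - a)) = i :: List.range' (i + 1) (b - (i - a) - 1) := by
    rw [show b - (i - a) = (b - (i - a) - 1) + 1 by omega, List.range'_succ]
    simp
  rw [hstep, pv_elimSeq_cons]
  have hpcn : pcs.getD i 0 < n := hpc i hi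
  have hrz : ∀ l ∈ List.range' (i + 1) (b - (i - a) - 1),
      (rows.getD l []).getD (pcs.getD i 0) 0 = 0 := by
    intro l hl
    have hl' := List.mem_range'_1.mp hl
    exact hzero i hi l (hmem2 l hl) (by omega)
  by_cases hc : v1.getD (pcs.getD i 0) 0 ≠ 0
  · rw [if_pos hc]
    rw [pv_elimSeq_untouched rows pcs n (pcs.getD i 0) hpcn _ _
      (fun x hx => hg x (hmem2 x hx)) (pv_xor_good v1 _ n hv1 (hg i hi)) hrz]
    rw [pv_getD_xor v1 _ (pcs.getD i 0) (by omega) (by rw [(hg i hi).1]; omega)]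
    have h1 : v1.getD (pcs.getD i 0) 0 = 1 := by
      rcases hv1.2 _ hpcn with h | h
      · exact absurd h hc
      · exact h
    rw [h1, hpiv i hi]
    norm_num
  · rw [if_neg hc]
    rw [pv_elimSeq_untouched rows pcs n (pcs.getD i 0) hpcn _ _
      (fun x hx => hg x (hmem2 x hx)) hv1 hrz]
    omega

-- elimination of a vector already 0 at every used pivot column is the identity
theorem pv_elimSeq_fixed (rows : List (List Int)) (pcs : List Nat) :
    ∀ (idxs : List Nat) (v : List Int),
      (∀ i ∈ idxs, v.getD (pcs.getD i 0) 0 = 0) → pvElimSeq rows pcs idxs v = v := by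
  intro idxs
  induction idxs with
  | nil => intro v _; rfl
  | cons i t ih =>
    intro v hz
    rw [pv_elimSeq_cons, if_neg (by rw [hz i (by simp)]; simp)]
    exact ih v (fun x hx => hz x (by simp [hx]))

-- elimSeq only looks at the rows/pivot columns it uses
theorem pv_elimSeq_congr (rows rows' : List (List Int)) (pcs pcs' : List Nat) :
    ∀ (idxs : List Nat) (v : List Int),
      (∀ i ∈ idxs, rows'.getD i [] = rows.getD i [] ∧ pcs'.getD i 0 = pcs.getD i 0) →
      pvElimSeq rows' pcs' idxs v = pvElimSeq rows pcs idxs v := by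
  intro idxs
  induction idxs with
  | nil => intro v _; rfl
  | cons i t ih =>
    intro v h
    rw [pv_elimSeq_cons, pv_elimSeq_cons, (h i (by simp)).1, (h i (by simp)).2]
    exact ih _ (fun x hx => h x (by simp [hx]))

-- the reduced rows of stage 2, defined top-down by recursion on rank - i
def pvRedAux (rows : List (List Int)) (pcs : List Nat) (rank i : Nat) : List (List Int) :=
  if h : i < rank then
    pvBackRow (rows.getD i []) ((pcs.drop (i + 1)).zip (pvRedAux rows pcs rank (i + 1))) ::
      pvRedAux rows pcs rank (i + 1)
  else []
termination_by rank - i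

theorem pv_backSub_aux (rows : List (List Int)) (pcs : List Nat) (rank : Nat) :
    ∀ (b j : Nat), rank - j = b → j ≤ rank →
      (List.range' j (rank - j)).reverse.foldl
        (fun red i => pvBackRow (rows.getD i []) ((pcs.drop (i + 1)).zip red) :: red) [] =
        pvRedAux rows pcs rank j := by
  intro b
  induction b with
  | zero =>
    intro j hb _
    rw [hb, pvRedAux, dif_neg (by omega)]
    rfl
  | succ b ih =>
    intro j hb hj
    have hjr : j < rank := by omega
    have h1 : rank - j = (rank - (j + 1)) + 1 := by omega
    rw [h1, List.range'_succ, List.reverse_cons, List.foldl_append,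
      ih (j + 1) (by omega) (by omega)]
    conv_rhs => rw [pvRedAux]
    rw [dif_pos hjr]
    rfl

theorem pv_backSub_eq_redAux (rows : List (List Int)) (pcs : List Nat) (rank : Nat) :
    pvBackSub rows pcs rank = pvRedAux rows pcs rank 0 := by
  unfold pvBackSub
  rw [List.range_eq_range']
  exact pv_backSub_aux rows pcs rank rank 0 (by omega) (by omega)

theorem pv_redAux_getD (rows : List (List Int)) (pcs : List Nat) (rank : Nat) :
    ∀ (t i : Nat), i + t < rank →
      (pvRedAux rows pcs rank i).getD t [] =
        pvBackRow (rows.getD (i + t) [])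
          ((pcs.drop (i + t + 1)).zip (pvRedAux rows pcs rank (i + t + 1))) := by
  intro t
  induction t with
  | zero =>
    intro i hi
    rw [pvRedAux, dif_pos (by omega)]
    simp
  | succ t ih =>
    intro i hi
    rw [pvRedAux, dif_pos (by omega)]
    have := ih (i + 1) (by omega)
    simpa [List.getD_cons_succ, show i + 1 + t = i + (t + 1) by omega] using this

theorem pv_backRow_cons (v : List Int) (pw : Nat × List Int) (rest : List (Nat × List Int)) :
    pvBackRow v (pw :: rest) =
      pvBackRow (if v.getD pw.1 0 ≠ 0 then pvXorRow v pw.2 else v) rest := rfl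

-- stage-2 inner loop = sequential elimination by the echelon rows (the heart of the proof)
theorem pv_backRow_eq_elimSeq (rows : List (List Int)) (pcs : List Nat) (n rank : Nat)
    (hlen : pcs.length = rank)
    (hg : ∀ i, i < rank → (rows.getD i []).length = n ∧
      (∀ j, j < n → (rows.getD i []).getD j 0 = 0 ∨ (rows.getD i []).getD j 0 = 1))
    (hpc : ∀ i, i < rank → pcs.getD i 0 < n)
    (hpiv : ∀ i, i < rank → (rows.getD i []).getD (pcs.getD i 0) 0 = 1)
    (hzero : ∀ i, i < rank → ∀ l, i < l → l < rank →
      (rows.getD l []).getD (pcs.getD i 0) 0 = 0) :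
    ∀ (b j : Nat), rank - j = b → j ≤ rank →
      ∀ (v : List Int),
        (v.length = n ∧ ∀ jj, jj < n → v.getD jj 0 = 0 ∨ v.getD jj 0 = 1) →
        pvBackRow v ((pcs.drop j).zip (pvRedAux rows pcs rank j)) =
          pvElimSeq rows pcs (List.range' j (rank - j)) v := by
  intro b
  induction b with
  | zero =>
    intro j hb hj v hv
    have hjr : j = rank := by omega
    subst hjr
    rw [Nat.sub_self, List.drop_eq_nil_of_le (by omega)]
    rfl
  | succ b ih =>
    intro j hb hj v hv
    have hjr : j < rank := by omega
    have hgmem : pvGoodRows rows n (List.range' (j + 1) (rank - (j + 1))) := by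
      intro x hx
      have := List.mem_range'_1.mp hx
      exact hg x (by omega)
    have hpcmem : ∀ x ∈ List.range' (j + 1) (rank - (j + 1)), pcs.getD x 0 < n := by
      intro x hx
      have := List.mem_range'_1.mp hx
      exact hpc x (by omega)
    have hdrop : pcs.drop j = pcs.getD j 0 :: pcs.drop (j + 1) := by
      rw [List.drop_eq_getElem_cons (by omega)]
      congr 1
      simp [List.getD, show j < pcs.length by omega]
    have hred : pvRedAux rows pcs rank j =
        pvBackRow (rows.getD j []) ((pcs.drop (j + 1)).zip (pvRedAux rows pcs rank (j + 1))) ::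
          pvRedAux rows pcs rank (j + 1) := by
      conv_lhs => rw [pvRedAux]
      rw [dif_pos hjr]
    have hrowj := hg j hjr
    have hredrow : pvBackRow (rows.getD j [])
        ((pcs.drop (j + 1)).zip (pvRedAux rows pcs rank (j + 1))) =
        pvElimSeq rows pcs (List.range' (j + 1) (rank - (j + 1))) (rows.getD j []) :=
      ih (j + 1) (by omega) (by omega) _ hrowj
    rw [hdrop, hred, List.zip_cons_cons, pv_backRow_cons]
    rw [show rank - j = (rank - (j + 1)) + 1 by omega, List.range'_succ, pv_elimSeq_cons]
    rcases hv.2 (pcs.getD j 0) (hpc j hjr) with h0 | h1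
    · rw [if_neg (by rw [h0]; simp), if_neg (by rw [h0]; simp)]
      exact ih (j + 1) (by omega) (by omega) v hv
    · rw [if_pos (by rw [h1]; norm_num), if_pos (by rw [h1]; norm_num), hredrow]
      have hu := pv_elimSeq_good rows pcs n (List.range' (j + 1) (rank - (j + 1)))
        (rows.getD j []) hgmem hrowj
      rw [ih (j + 1) (by omega) (by omega) _ (pv_xor_good v _ n hv hu)]
      rw [pv_elimSeq_linear rows pcs n _ v _ hgmem hpcmem hv hu]
      rw [pv_elimSeq_linear rows pcs n _ v (rows.getD j []) hgmem hpcmem hv hrowj]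
      congr 1
      apply pv_elimSeq_fixed
      intro i hi'
      refine pv_elimSeq_clears rows pcs n (j + 1) (rank - (j + 1)) (rows.getD j [])
        hgmem hpcmem ?_ ?_ hrowj i hi'
      · intro x hx
        have := List.mem_range'_1.mp hx
        exact hpiv x (by omega)
      · intro x hx l hl hxl
        have := List.mem_range'_1.mp hx
        have := List.mem_range'_1.mp hl
        exact hzero x (by omega) l hxl (by omega)

theorem pv_getD_concat_self {α : Type} (a : List α) (x : α) (d : α) :
    (a ++ [x]).getD a.length d = x := by
  simp [List.getD]

-- splitting off the last eliminated index
theorem pv_range'_concat (a b : Nat) (h : 0 < b) :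
    List.range' a b = List.range' a (b - 1) ++ [a + (b - 1)] := by
  calc List.range' a b = List.range' a ((b - 1) + 1) := by rw [show (b - 1) + 1 = b by omega]
    _ = List.range' a (b - 1) ++ List.range' (a + 1 * (b - 1)) 1 := List.range'_append.symm
    _ = List.range' a (b - 1) ++ [a + (b - 1)] := by rw [show a + 1 * (b - 1) = a + (b - 1) by omega]; rfl

-- one column of the loop preserves the invariant
theorem pv_step_inv (m n col : Nat) (hcol : col < n)
    (sa sb : List (List Int) × Nat × List Nat) (h : pvInv m n sa sb) :
    pvInv m n (pvElimStepA m n col sa) (pvElimStepB m col sb) := by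
  obtain ⟨aug, rank, pcs⟩ := sa
  obtain ⟨rows, rankB, pcsB⟩ := sb
  obtain ⟨hla, hlb, hrk, hpcs, hlen, hrm, hpcn, hwid, hlenB, h01, hpiv, hzero, hlow, hup⟩ := h
  simp only at hla hlb hrk hpcs hlen hrm hpcn hwid hlenB h01 hpiv hzero hlow hup
  subst hrk
  subst hpcs
  have hfind : pvFindPivotA aug col rank m = pvFindPivotB rows col rank m := by
    unfold pvFindPivotA pvFindPivotB
    apply pv_find_congr
    intro r hr
    have hrm' : rank ≤ r ∧ r < m := by
      have := List.mem_range'_1.mp hr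
      omega
    have heq := hlow r hrm'.1 hrm'.2 col hcol
    unfold pvRowA
    rw [heq]
    rcases h01 r hrm'.2 col hcol with h0 | h0 <;> rw [h0] <;> decide
  simp only [pvElimStepA, pvElimStepB]
  rw [hfind]
  cases hres : pvFindPivotB rows col rank m with
  | none => exact ⟨hla, hlb, rfl, rfl, hlen, hrm, hpcn, hwid, hlenB, h01, hpiv, hzero, hlow, hup⟩
  | some p =>
    have hpmem := List.mem_of_find?_eq_some hres
    have hpm : rank ≤ p ∧ p < m := by
      have := List.mem_range'_1.mp hpmem
      omega
    have hrkm : rank < m := by omega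
    have hppred := List.find?_some hres
    have hpv1 : (rows.getD p []).getD col 0 = 1 := by
      rcases h01 p hpm.2 col hcol with h0 | h0
      · rw [h0] at hppred
        exact absurd hppred (by decide)
      · exact h0
    dsimp only
    -- row accesses after the swap
    have hswapA : ∀ r, ((aug.set rank (pvRowA aug p)).set p (pvRowA aug rank)).getD r [] =
        if r = p then aug.getD rank [] else if r = rank then aug.getD p [] else aug.getD r [] :=
      fun r => pv_getD_swap aug [] rank p r (by omega) (by omega)
    have hswapB : ∀ r, ((rows.set rank (rows.getD p [])).set p (rows.getD rank [])).getD r [] =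
        if r = p then rows.getD rank [] else if r = rank then rows.getD p []
        else rows.getD r [] :=
      fun r => pv_getD_swap rows [] rank p r (by omega) (by omega)
    set aug1 := (aug.set rank (pvRowA aug p)).set p (pvRowA aug rank) with haug1
    set rows1 := (rows.set rank (rows.getD p [])).set p (rows.getD rank []) with hrows1
    have hlen1A : aug1.length = m := by simp [haug1, hla]
    have hlen1B : rows1.length = m := by simp [hrows1, hlb]
    have hup1 : ∀ r, r < rank → rows1.getD r [] = rows.getD r [] ∧
        aug1.getD r [] = aug.getD r [] := by
      intro r hr
      rw [hswapA r, hswapB r, if_neg (by omega), if_neg (by omega),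
        if_neg (by omega), if_neg (by omega)]
      exact ⟨rfl, rfl⟩
    have hrank1 : rows1.getD rank [] = rows.getD p [] ∧ aug1.getD rank [] = aug.getD p [] := by
      rw [hswapA rank, hswapB rank]
      by_cases hpr : rank = p
      · rw [if_pos hpr, if_pos hpr, hpr]
        exact ⟨rfl, rfl⟩
      · rw [if_neg hpr, if_neg hpr, if_pos rfl, if_pos rfl]
        exact ⟨rfl, rfl⟩
    -- B-side facts carried through the swap (rows1 is a permutation of rows)
    have hB1 : ∀ r, r < m → (rows1.getD r []).length = n ∧
        (∀ j, j < n → (rows1.getD r []).getD j 0 = 0 ∨ (rows1.getD r []).getD j 0 = 1) := by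
      intro r hr
      rw [hswapB r]
      split_ifs <;> exact ⟨hlenB _ (by omega), h01 _ (by omega)⟩
    have hA1 : ∀ r, r < m → n ≤ (aug1.getD r []).length := by
      intro r hr
      rw [hswapA r]
      split_ifs <;> exact hwid _ (by omega)
    have hlow1 : ∀ r, rank ≤ r → r < m → ∀ j, j < n →
        (aug1.getD r []).getD j 0 % 2 = (rows1.getD r []).getD j 0 := by
      intro r hrr hr j hj
      rw [hswapA r, hswapB r]
      split_ifs <;> exact hlow _ (by omega) (by omega) j hj
    have hz1 : ∀ i, i < rank → ∀ r, i < r → r < m →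
        (rows1.getD r []).getD (pcs.getD i 0) 0 = 0 := by
      intro i hi r hir hr
      rw [hswapB r]
      split_ifs <;> exact hzero i hi _ (by omega) (by omega)
    set rowPA := pvRowA aug p with hrowPA
    set rowP := rows.getD p [] with hrowP
    have hlowP : ∀ j, j < n → rowPA.getD j 0 % 2 = rowP.getD j 0 := by
      intro j hj
      exact hlow p hpm.1 hpm.2 j hj
    have hrowPg : rowP.length = n ∧
        (∀ j, j < n → rowP.getD j 0 = 0 ∨ rowP.getD j 0 = 1) :=
      ⟨hlenB p hpm.2, h01 p hpm.2⟩
    -- rows after the elimination of the column below the pivot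
    have hget2A : ∀ r, r < m →
        (aug1.mapIdx (fun r rowv =>
          if r ≠ rank ∧ rowv.getD col 0 % 2 == 1 then
            (List.range (n + n)).map (fun c => (rowv.getD c 0 + rowPA.getD c 0) % 2)
          else rowv)).getD r [] =
        if r ≠ rank ∧ (aug1.getD r []).getD col 0 % 2 == 1 then
          (List.range (n + n)).map (fun c => ((aug1.getD r []).getD c 0 + rowPA.getD c 0) % 2)
        else aug1.getD r [] := by
      intro r hr
      exact pv_getD_mapIdx _ _ r [] (by omega)
    have hget2B : ∀ r, r < m →
        (rows1.mapIdx (fun r x =>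
          if rank + 1 ≤ r ∧ x.getD col 0 ≠ 0 then pvXorRow x rowP else x)).getD r [] =
        if rank + 1 ≤ r ∧ (rows1.getD r []).getD col 0 ≠ 0 then
          pvXorRow (rows1.getD r []) rowP else rows1.getD r [] := by
      intro r hr
      exact pv_getD_mapIdx _ _ r [] (by omega)
    set aug2 := aug1.mapIdx (fun r rowv =>
      if r ≠ rank ∧ rowv.getD col 0 % 2 == 1 then
        (List.range (n + n)).map (fun c => (rowv.getD c 0 + rowPA.getD c 0) % 2)
      else rowv) with haug2
    set rows2 := rows1.mapIdx (fun r x =>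
      if rank + 1 ≤ r ∧ x.getD col 0 ≠ 0 then pvXorRow x rowP else x) with hrows2
    have hB2 : ∀ r, r < m → (rows2.getD r []).length = n ∧
        (∀ j, j < n → (rows2.getD r []).getD j 0 = 0 ∨ (rows2.getD r []).getD j 0 = 1) := by
      intro r hr
      rw [hget2B r hr]
      split_ifs with hc
      · exact pv_xor_good _ _ n (hB1 r hr) hrowPg
      · exact hB1 r hr
    unfold pvInv
    dsimp only
    refine ⟨by simp [haug2, hlen1A], by simp [hrows2, hlen1B], rfl, rfl,
      by simp [hlen], by omega, ?_, ?_, fun r hr => (hB2 r hr).1, fun r hr => (hB2 r hr).2,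
      ?_, ?_, ?_, ?_⟩
    · -- pivot columns in range
      intro i hi
      by_cases hik : i < rank
      · rw [pv_getD_append_left _ _ _ _ (by omega)]
        exact hpcn i hik
      · have hieq : i = rank := by omega
        subst hieq
        rw [← hlen, pv_getD_concat_self]
        exact hcol
    · -- width of A rows
      intro r hr
      rw [hget2A r hr]
      split_ifs
      · simp
      · exact hA1 r hr
    · -- pivot entries are 1
      intro i hi
      rw [hget2B i (by omega), if_neg (fun hh => absurd hh.1 (by omega))]
      by_cases hik : i < rank
      · rw [pv_getD_append_left _ _ _ _ (by omega), (hup1 i hik).1]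
        exact hpiv i hik
      · have hieq : i = rank := by omega
        rw [hieq,
          show (pcs ++ [col]).getD rank 0 = col from by rw [← hlen, pv_getD_concat_self],
          hrank1.1]
        exact hpv1
    · -- zeros below every pivot column
      intro i hi r hir hr
      rw [hget2B r hr]
      by_cases hik : i < rank
      · rw [pv_getD_append_left _ _ _ _ (by omega)]
        split_ifs with hc
        · rw [pv_getD_xor _ _ _ (by rw [(hB1 r hr).1]; exact hpcn i hik)
            (by rw [hrowPg.1]; exact hpcn i hik)]
          rw [hz1 i hik r hir hr, hzero i hik p (by omega) hpm.2]
          norm_num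
        · exact hz1 i hik r hir hr
      · have hieq : i = rank := by omega
        rw [hieq,
          show (pcs ++ [col]).getD rank 0 = col from by rw [← hlen, pv_getD_concat_self]]
        by_cases hc : (rows1.getD r []).getD col 0 ≠ 0
        · rw [if_pos ⟨by omega, hc⟩,
            pv_getD_xor _ _ _ (by rw [(hB1 r hr).1]; omega) (by rw [hrowPg.1]; omega)]
          have h1 : (rows1.getD r []).getD col 0 = 1 := by
            rcases (hB1 r hr).2 col hcol with h0 | h0
            · exact absurd h0 hc
            · exact h0
          rw [h1, hpv1]
          norm_num
        · rw [if_neg (fun hh => hc hh.2)]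
          rw [not_not] at hc
          exact hc
    · -- rows at and below the new rank agree modulo 2
      intro r hrr hr j hj
      rw [hget2A r hr, hget2B r hr]
      by_cases hc : (rows1.getD r []).getD col 0 ≠ 0
      · have h1 : (rows1.getD r []).getD col 0 = 1 := by
          rcases (hB1 r hr).2 col hcol with h0 | h0
          · exact absurd h0 hc
          · exact h0
        rw [if_pos ⟨by omega, by rw [hlow1 r (by omega) hr col hcol, h1]; decide⟩,
          if_pos ⟨by omega, hc⟩]
        rw [pv_getD_map_range _ _ j _ (by omega),
          pv_getD_xor _ _ j (by rw [(hB1 r hr).1]; omega) (by rw [hrowPg.1]; omega)]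
        have e1 := hlow1 r (by omega) hr j hj
        have e2 := hlowP j hj
        omega
      · have h0 : (aug1.getD r []).getD col 0 % 2 = 0 := by
          rw [hlow1 r (by omega) hr col hcol]
          rw [not_not] at hc
          exact hc
        rw [if_neg (fun hh => absurd (h0 ▸ hh.2) (by decide)), if_neg (fun hh => hc hh.2)]
        exact hlow1 r (by omega) hr j hj
    · -- upper rows are the sequentially eliminated echelon rows
      intro i hi j hj
      by_cases hik : i < rank
      · have hrows2i : rows2.getD i [] = rows.getD i [] := by
          rw [hget2B i (by omega), if_neg (fun hh => absurd hh.1 (by omega)), (hup1 i hik).1]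
        set vtmp := pvElimSeq rows pcs (List.range' (i + 1) (rank - i - 1)) (rows.getD i [])
          with hv
        have hvg := pv_elimSeq_good rows pcs n (List.range' (i + 1) (rank - i - 1))
          (rows.getD i [])
          (fun x hx => by
            have := List.mem_range'_1.mp hx
            exact ⟨hlenB x (by omega), h01 x (by omega)⟩)
          ⟨hlenB i (by omega), h01 i (by omega)⟩
        have hsuffix : List.range' (i + 1) (rank + 1 - i - 1) =
            List.range' (i + 1) (rank - i - 1) ++ [rank] := by
          rw [pv_range'_concat (i + 1) (rank + 1 - i - 1) (by omega),
            show (i + 1) + ((rank + 1 - i - 1) - 1) = rank by omega,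
            show (rank + 1 - i - 1) - 1 = rank - i - 1 by omega]
        have hcongr : pvElimSeq rows2 (pcs ++ [col]) (List.range' (i + 1) (rank - i - 1))
            (rows.getD i []) = vtmp := by
          rw [hv]
          apply pv_elimSeq_congr
          intro l hl
          have hlr := List.mem_range'_1.mp hl
          constructor
          · rw [hget2B l (by omega), if_neg (fun hh => absurd hh.1 (by omega)),
              (hup1 l (by omega)).1]
          · rw [pv_getD_append_left _ _ _ _ (by omega)]
        have hrows2rank : rows2.getD rank [] = rowP := by
          rw [hget2B rank (by omega), if_neg (fun hh => absurd hh.1 (by omega)), hrank1.1]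
        have hpcs'rank : (pcs ++ [col]).getD rank 0 = col := by
          rw [← hlen, pv_getD_concat_self]
        rw [hrows2i, hsuffix, pv_elimSeq_append, hcongr, pv_elimSeq_cons, hpcs'rank,
          hrows2rank, pv_elimSeq_nil]
        rw [hget2A i (by omega), (hup1 i hik).2]
        by_cases hvc : vtmp.getD col 0 ≠ 0
        · have h1 : vtmp.getD col 0 = 1 := by
            rcases hvg.2 col hcol with h0 | h0
            · exact absurd h0 hvc
            · exact h0
          have ec : (aug.getD i []).getD col 0 % 2 = vtmp.getD col 0 := by
            have e := hup i hik col hcol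
            rw [← hv] at e
            exact e
          rw [if_pos ⟨by omega, by rw [ec, h1]; decide⟩, if_pos hvc]
          rw [pv_getD_map_range _ _ j _ (by omega),
            pv_getD_xor vtmp rowP j (by rw [hvg.1]; omega) (by rw [hrowPg.1]; omega)]
          have e1 := hup i hik j hj
          rw [← hv] at e1
          have e2 := hlowP j hj
          omega
        · rw [not_not] at hvc
          have h0 : (aug.getD i []).getD col 0 % 2 = 0 := by
            have e := hup i hik col hcol
            rw [← hv] at e
            rw [e]
            exact hvc
          rw [if_neg (fun hh => absurd (h0 ▸ hh.2) (by decide)),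
            if_neg (by rw [hvc]; simp)]
          have e := hup i hik j hj
          rw [← hv] at e
          exact e
      · have hieq : i = rank := by omega
        rw [hieq, show rank + 1 - rank - 1 = 0 by omega]
        rw [hget2A rank (by omega), if_neg (fun hh => absurd hh.1 (by simp)), hrank1.2,
          hget2B rank (by omega), if_neg (fun hh => absurd hh.1 (by omega)), hrank1.1,
          List.range'_zero, pv_elimSeq_nil]
        exact hlowP j hj

theorem pv_fold_inv (m n : Nat) (cols : List Nat) (hcols : ∀ c ∈ cols, c < n)
    (sa sb : List (List Int) × Nat × List Nat) (h : pvInv m n sa sb) :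
    pvInv m n (cols.foldl (fun st c => pvElimStepA m n c st) sa)
      (cols.foldl (fun st c => pvElimStepB m c st) sb) := by
  induction cols generalizing sa sb with
  | nil => exact h
  | cons c t ih =>
    simp only [List.foldl_cons]
    exact ih (fun x hx => hcols x (by simp [hx])) _ _
      (pv_step_inv m n c (hcols c (by simp)) sa sb h)

theorem pv_getD_take {α : Type} (l : List α) (n j : Nat) (d : α) (hj : j < n)
    (_hl : j < l.length) : (l.take n).getD j d = l.getD j d := by
  simp [List.getD, hj]

-- unfolding the two ports on a nonempty matrix with a nonempty first row
theorem pv_A_eq (r0 : List Int) (rest : List (List Int)) (h0 : ¬ r0.isEmpty = true) :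
    gf2_kernel_basis_py (r0 :: rest) = pvExtractA (r0 :: rest).length r0.length
      (pvElimA (r0 :: rest).length r0.length ((r0 :: rest).mapIdx (fun i row =>
        row ++ (List.range r0.length).map (fun j => if j = i then (1 : Int) else 0)))) := by
  simp only [gf2_kernel_basis_py, h0, Bool.false_eq_true, if_false, List.mapIdx_cons,
    List.length_cons]

theorem pv_B_eq (r0 : List Int) (rest : List (List Int)) (h0 : ¬ r0.isEmpty = true) :
    gf2_kernel_basis_py_alt (r0 :: rest) = pvExtractB r0.length
      (pvElimB (r0 :: rest).length r0.length
        ((r0 :: rest).map (fun row => (row.take r0.length).map (fun x => x % 2)))).2.2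
      (pvBackSub
        (pvElimB (r0 :: rest).length r0.length
          ((r0 :: rest).map (fun row => (row.take r0.length).map (fun x => x % 2)))).1
        (pvElimB (r0 :: rest).length r0.length
          ((r0 :: rest).map (fun row => (row.take r0.length).map (fun x => x % 2)))).2.2
        (pvElimB (r0 :: rest).length r0.length
          ((r0 :: rest).map (fun row => (row.take r0.length).map (fun x => x % 2)))).2.1) := by
  simp only [gf2_kernel_basis_py_alt, h0, Bool.false_eq_true, if_false, List.map_cons,
    List.length_cons]

-- final states satisfying the invariant extract the same basis
theorem pv_extract_eq (m n : Nat) (sa sb : List (List Int) × Nat × List Nat)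
    (h : pvInv m n sa sb) :
    pvExtractA m n sa = pvExtractB n sb.2.2 (pvBackSub sb.1 sb.2.2 sb.2.1) := by
  obtain ⟨aug, rank, pcs⟩ := sa
  obtain ⟨rows, rankB, pcsB⟩ := sb
  obtain ⟨hla, hlb, hrk, hpcs, hlen, hrm, hpcn, hwid, hlenB, h01, hpiv, hzero, hlow, hup⟩ := h
  simp only at hla hlb hrk hpcs hlen hrm hpcn hwid hlenB h01 hpiv hzero hlow hup
  subst hrk
  subst hpcs
  unfold pvExtractA pvExtractB
  dsimp only
  apply List.map_congr_left
  intro fc hfc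
  have hfcn : fc < n := List.mem_range.mp (List.mem_filter.mp hfc).1
  apply pv_foldl_congr
  refine List.forall_mem_zipIdx'.mpr ?_
  intro i hi vec
  dsimp only
  have hir : i < rank := by omega
  rw [if_pos (by omega : i < m)]
  congr 1
  unfold pvRowA
  rw [pv_backSub_eq_redAux,
    pv_redAux_getD rows pcs rank i 0 (by omega), Nat.zero_add,
    pv_backRow_eq_elimSeq rows pcs n rank hlen
      (fun l hl => ⟨hlenB l (by omega), h01 l (by omega)⟩)
      (fun l hl => hpcn l hl)
      (fun l hl => hpiv l hl)
      (fun l hl ll hll hllr => hzero l hl ll hll (by omega))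
      (rank - (i + 1)) (i + 1) rfl (by omega)
      (rows.getD i []) ⟨hlenB i (by omega), h01 i (by omega)⟩]
  rw [show rank - (i + 1) = rank - i - 1 by omega]
  exact hup i hir fc hfcn

-- ===== VERDICT (by name: the statement is the Claim_ definition above) =====
theorem gf2_kernel_basis_py_spec : Claim_equal_gf2_kernel_basis_py := by
  intro matrix _hdom hpre
  unfold Spec_gf2_kernel_basis_py
  cases matrix with
  | nil => rfl
  | cons r0 rest =>
    by_cases h0 : r0.isEmpty
    · simp [gf2_kernel_basis_py, gf2_kernel_basis_py_alt, h0]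
    · rw [pv_A_eq r0 rest h0, pv_B_eq r0 rest h0]
      have hrowlen : ∀ r, r < (r0 :: rest).length →
          r0.length ≤ ((r0 :: rest).getD r []).length := by
        intro r hr
        have hg : (r0 :: rest).getD r [] = (r0 :: rest)[r] := by
          simp [List.getD, List.getElem?_eq_getElem hr]
        have hmem : (r0 :: rest).getD r [] ∈ (r0 :: rest) := by
          rw [hg]
          exact List.getElem_mem _
        have := hpre _ hmem
        simpa using this
      have hinv0 : pvInv (r0 :: rest).length r0.length
          ((r0 :: rest).mapIdx (fun i row => row ++ (List.range r0.length).map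
            (fun j => if j = i then (1 : Int) else 0)), 0, ([] : List Nat))
          ((r0 :: rest).map (fun row => (row.take r0.length).map (fun x => x % 2)), 0,
            ([] : List Nat)) := by
        refine ⟨by simp, by simp, rfl, rfl, rfl, Nat.zero_le _,
          fun i hi => absurd hi (Nat.not_lt_zero i),
          ?_, ?_, ?_, fun i hi => absurd hi (Nat.not_lt_zero i),
          fun i hi => absurd hi (Nat.not_lt_zero i), ?_,
          fun i hi => absurd hi (Nat.not_lt_zero i)⟩
        · intro r hr
          rw [pv_getD_mapIdx _ _ r [] (by simpa using hr)]
          rw [List.length_append, List.length_map, List.length_range]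
          omega
        · intro r hr
          rw [pv_getD_map _ _ r [] [] (by simpa using hr), List.length_map, List.length_take]
          have := hrowlen r hr
          omega
        · intro r hr j hj
          rw [pv_getD_map _ _ r [] [] (by simpa using hr)]
          have hlt : j < (((r0 :: rest).getD r []).take r0.length).length := by
            rw [List.length_take]
            have := hrowlen r hr
            omega
          rw [pv_getD_map _ _ j 0 0 hlt]
          exact pv_mod2_01 _
        · intro r _ hr j hj
          rw [pv_getD_mapIdx _ _ r [] (by simpa using hr),
            pv_getD_map _ _ r [] [] (by simpa using hr)]
          have hjr : j < ((r0 :: rest).getD r []).length := by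
            have := hrowlen r hr
            omega
          rw [pv_getD_append_left _ _ _ _ hjr]
          have hlt : j < (((r0 :: rest).getD r []).take r0.length).length := by
            rw [List.length_take]
            omega
          rw [pv_getD_map _ _ j 0 0 hlt, pv_getD_take _ _ _ _ hj hjr]
      have hinv : pvInv (r0 :: rest).length r0.length
          (pvElimA (r0 :: rest).length r0.length
            ((r0 :: rest).mapIdx (fun i row => row ++ (List.range r0.length).map
              (fun j => if j = i then (1 : Int) else 0))))
          (pvElimB (r0 :: rest).length r0.length
            ((r0 :: rest).map (fun row => (row.take r0.length).map (fun x => x % 2)))) :=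
        pv_fold_inv (r0 :: rest).length r0.length (List.range r0.length)
          (fun c hc => List.mem_range.mp hc) _ _ hinv0
      exact pv_extract_eq (r0 :: rest).length r0.length _ _ hinv
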